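-- pv_equiv track=rewrite | github.com/Andyporras/Recursion_cola | contarDigitosDivisoresCola.py | aux
-- ===== SOURCE A (Python) =====
-- def aux(num, divisor,result):
--     if(num == 0):
--         return result
--     else:
--         if((num%10)%divisor==0):
--             return aux(num//10,divisor,result+1)
--         else:
--             return aux(num//10,divisor,result)
-- ===== SOURCE B (Python) =====
-- def aux(num, divisor, result):
--     # Phase 1: extract the digits of num (low to high).
--     digits = []
--     while num != 0:
--         digits.append(num % 10)
--         num //= 10
--     # Phase 2: count the digits divisible by divisor.
--     return result + sum(1 for d in digits if d % divisor == 0)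
-- ===== Notes on version B (the rewrite author's own statement) =====
-- stated objective: simpler
-- what changed: Replaces the tail recursion carrying an accumulator with two phases: an iterative digit extraction into a list, then a generator-sum count of the divisible digits.
import Mathlib
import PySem

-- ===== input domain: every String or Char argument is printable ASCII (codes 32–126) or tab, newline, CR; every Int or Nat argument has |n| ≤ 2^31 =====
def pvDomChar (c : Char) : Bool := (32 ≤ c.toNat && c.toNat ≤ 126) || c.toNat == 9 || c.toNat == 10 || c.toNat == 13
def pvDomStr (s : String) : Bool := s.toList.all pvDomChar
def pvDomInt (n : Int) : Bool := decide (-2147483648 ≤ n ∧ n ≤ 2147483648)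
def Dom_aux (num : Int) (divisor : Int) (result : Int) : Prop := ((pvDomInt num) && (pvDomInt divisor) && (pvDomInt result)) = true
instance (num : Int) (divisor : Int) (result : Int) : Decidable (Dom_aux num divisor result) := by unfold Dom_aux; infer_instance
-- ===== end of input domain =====

-- B changes the decomposition from an accumulator-passing tail recursion to digit extraction followed by a count ("simpler").

-- termination helper for both ports (num//10 shrinks when num > 0)
theorem pv_floordiv10_lt (num : Int) (h : ¬ num ≤ 0) :
    (PySem.Int.floordiv num 10).toNat < num.toNat := by
  have e : num = (num.toNat : Int) := by omega
  rw [e]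
  have hd := PySem.Int.floordiv_natCast num.toNat 10
  simp only [Nat.cast_ofNat] at hd
  rw [hd, Int.toNat_natCast]
  exact Nat.div_lt_self (by omega) (by omega)

-- ===== PORT A =====
-- literal port of A's tail recursion; num < 0 diverges in Python and is outside Pre_aux
def aux (num : Int) (divisor : Int) (result : Int) : Int :=
  if _h : num ≤ 0 then result
  else if PySem.Int.mod (PySem.Int.mod num 10) divisor = 0 then
    aux (PySem.Int.floordiv num 10) divisor (result + 1)
  else
    aux (PySem.Int.floordiv num 10) divisor result
termination_by num.toNat
decreasing_by all_goals exact pv_floordiv10_lt num _h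

-- ===== PORT B =====
-- phase 1 of Source B: the digits of num, low to high
def pvDigits (num : Int) : List Int :=
  if _h : num ≤ 0 then []
  else PySem.Int.mod num 10 :: pvDigits (PySem.Int.floordiv num 10)
termination_by num.toNat
decreasing_by exact pv_floordiv10_lt num _h

-- phase 2 of Source B: result + count of divisible digits
def aux_alt (num : Int) (divisor : Int) (result : Int) : Int :=
  result + ((pvDigits num).countP (fun d => PySem.Int.mod d divisor = 0) : Int)

-- ===== PRECONDITION & SPEC =====
-- Pre_ excludes num < 0 (Python A loops forever: -1 // 10 == -1) and divisor = 0 with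
-- num ≠ 0 (Python A raises ZeroDivisionError).
def Pre_aux (num : Int) (divisor : Int) (result : Int) : Prop :=
  0 ≤ num ∧ (num = 0 ∨ divisor ≠ 0)
instance (num : Int) (divisor : Int) (result : Int) : Decidable (Pre_aux num divisor result) := by unfold Pre_aux; infer_instance

def pvWitness_aux : Int × Int × Int := (1234, 2, 0)

def Spec_aux (num : Int) (divisor : Int) (result : Int) (out : Int) : Prop := out = aux_alt num divisor result
instance (num : Int) (divisor : Int) (result : Int) (out : Int) : Decidable (Spec_aux num divisor result out) := by unfold Spec_aux; infer_instance

-- ===== CLAIM (what is proved, stated in full; the proofs are below) =====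
def Claim_equal_aux : Prop := ∀ (num : Int) (divisor : Int) (result : Int), Dom_aux num divisor result → Pre_aux num divisor result → Spec_aux num divisor result (aux num divisor result)

-- ===== LEMMAS AND PROOFS =====

theorem aux_eq_alt (num divisor result : Int) :
    aux num divisor result = aux_alt num divisor result := by
  fun_induction aux num divisor result with
  | case1 num result h =>
      unfold aux_alt
      rw [pvDigits]
      simp [h]
  | case2 num result h hmod ih =>
      rw [ih]
      unfold aux_alt
      conv_rhs => rw [pvDigits, dif_neg h, List.countP_cons]
      simp only [hmod, decide_true]
      push_cast
      ring
  | case3 num result h hmod ih =>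
      rw [ih]
      unfold aux_alt
      conv_rhs => rw [pvDigits, dif_neg h, List.countP_cons]
      simp only [hmod, decide_false, if_neg Bool.false_ne_true, Nat.add_zero]

-- ===== VERDICT (by name: the statement is the Claim_ definition above) =====
theorem aux_spec : Claim_equal_aux := by
  intro num divisor result _ _
  exact aux_eq_alt num divisor result
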